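-- pv_equiv track=rewrite | github.com/junhyukM/algorithm_python | 프로그래머스/0/181926. 수 조작하기 1/수 조작하기 1.py | solution
-- ===== SOURCE A (Python) =====
-- def solution(n, control):
--     answer = 0
--     for i in control:
--         if i == 'w':
--             answer += 1
--         elif i == 's':
--             answer += -1
--         elif i == 'd':
--             answer += 10
--         else:
--             answer += -10
--     answer += n
--     return answer
-- ===== SOURCE B (Python) =====
-- def solution(n, control):
--     cw = control.count('w')
--     cs = control.count('s')
--     cd = control.count('d')
--     other = len(control) - cw - cs - cd
--     return n + cw - cs + 10 * cd - 10 * other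
-- ===== Notes on version B (the rewrite author's own statement) =====
-- stated objective: faster
-- what changed: Replaces the single accumulating loop with if/elif branches by str.count-based counting of each control character (else bucket = len minus the three counts) and one closed arithmetic expression.
import Mathlib
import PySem

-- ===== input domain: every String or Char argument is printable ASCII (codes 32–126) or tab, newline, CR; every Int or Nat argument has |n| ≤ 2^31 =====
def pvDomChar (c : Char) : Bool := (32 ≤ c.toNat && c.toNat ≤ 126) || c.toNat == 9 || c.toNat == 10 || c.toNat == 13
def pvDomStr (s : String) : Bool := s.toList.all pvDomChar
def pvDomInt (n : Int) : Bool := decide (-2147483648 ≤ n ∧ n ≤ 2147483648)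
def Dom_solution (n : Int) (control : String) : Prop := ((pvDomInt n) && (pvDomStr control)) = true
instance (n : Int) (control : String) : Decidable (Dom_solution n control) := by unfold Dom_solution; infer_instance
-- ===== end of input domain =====

-- B replaces A's accumulating if/elif loop by str.count-based counting and one closed arithmetic expression (idiomatic, same O(n) cost).


-- ===== PORT A =====
-- for i in control: if/elif chain accumulating into answer, then answer += n
def solution (n : Int) (control : String) : Int :=
  let answer : Int :=
    control.toList.foldl
      (fun answer i =>
        if i == 'w' then answer + 1
        else if i == 's' then answer + (-1)
        else if i == 'd' then answer + 10
        else answer + (-10)) 0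
  answer + n

-- ===== PORT B =====
-- cw/cs/cd via str.count, the else bucket as len - cw - cs - cd, one closed formula
def solution_alt (n : Int) (control : String) : Int :=
  let cw : Int := PySem.Str.count control "w"
  let cs : Int := PySem.Str.count control "s"
  let cd : Int := PySem.Str.count control "d"
  let other : Int := PySem.Str.len control - cw - cs - cd
  n + cw - cs + 10 * cd - 10 * other

-- ===== PRECONDITION & SPEC =====
def Spec_solution (n : Int) (control : String) (out : Int) : Prop := out = solution_alt n control
instance (n : Int) (control : String) (out : Int) : Decidable (Spec_solution n control out) := by unfold Spec_solution; infer_instance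

-- ===== CLAIM (what is proved, stated in full; the proofs are below) =====
def Claim_equal_solution : Prop := ∀ (n : Int) (control : String), Dom_solution n control → Spec_solution n control (solution n control)

-- ===== LEMMAS AND PROOFS =====

theorem chars_count_go_single (c : Char) : ∀ (fuel : Nat) (cs : List Char) (acc : Nat),
    cs.length ≤ fuel → PySem.Chars.count.go [c] fuel cs acc = acc + cs.count c := by
  intro fuel
  induction fuel with
  | zero =>
    intro cs acc h
    have : cs = [] := List.eq_nil_of_length_eq_zero (Nat.le_zero.mp h)
    subst this; simp [PySem.Chars.count.go]
  | succ f ih =>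
    intro cs acc h
    cases cs with
    | nil => simp [PySem.Chars.count.go]
    | cons x t =>
      simp only [PySem.Chars.count.go]
      by_cases hx : x = c
      · subst hx
        simp only [List.isPrefixOf_cons₂, List.isPrefixOf_nil_left, BEq.rfl, Bool.and_self, if_pos]
        rw [ih]
        · simp; omega
        · simpa using Nat.le_of_succ_le_succ (by simpa using h)
      · have hp : [c].isPrefixOf (x :: t) = false := by
          simp [List.isPrefixOf_cons₂]; exact fun hxc => (hx (by simpa using hxc.symm)).elim
        rw [hp, if_neg (by simp)]
        rw [ih t acc (by simpa using Nat.le_of_succ_le_succ (by simpa using h))]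
        simp [hx]

theorem chars_count_single (cs : List Char) (c : Char) :
    PySem.Chars.count cs [c] = cs.count c := by
  unfold PySem.Chars.count
  rw [if_neg (by simp)]
  simpa using chars_count_go_single c cs.length cs 0 (le_refl _)

theorem foldl_step (cs : List Char) (a : Int) :
    cs.foldl
      (fun answer i =>
        if i == 'w' then answer + 1
        else if i == 's' then answer + (-1)
        else if i == 'd' then answer + 10
        else answer + (-10)) a
    = a + (cs.count 'w' : Int) - cs.count 's' + 10 * cs.count 'd'
        - 10 * ((cs.length : Int) - cs.count 'w' - cs.count 's' - cs.count 'd') := by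
  induction cs generalizing a with
  | nil => simp
  | cons x t ih =>
    simp only [List.foldl_cons, ih, List.count_cons, List.length_cons]
    by_cases h1 : x = 'w'
    · simp [h1]; ring
    · by_cases h2 : x = 's'
      · simp [h2]; ring
      · by_cases h3 : x = 'd'
        · simp [h3]; ring
        · simp [h1, h2, h3]; ring

-- ===== VERDICT (by name: the statement is the Claim_ definition above) =====
theorem solution_spec : Claim_equal_solution := by
  intro n control _
  unfold Spec_solution solution solution_alt
  simp only [PySem.Str.count_eq, PySem.Str.len_eq, foldl_step]
  have hw := chars_count_single control.toList 'w'
  have hs := chars_count_single control.toList 's'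
  have hd := chars_count_single control.toList 'd'
  rw [show ("w" : String).toList = ['w'] from rfl, show ("s" : String).toList = ['s'] from rfl,
      show ("d" : String).toList = ['d'] from rfl, hw, hs, hd]
  ring
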